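-- pv_equiv track=rewrite | github.com/NikKazakov/diploma | custom_p/network_protocols/generator/protocol_class_creator.py | populate_simple
-- ===== SOURCE A (Python) =====
-- def populate_simple(format: str, FIELDS_SIMPLE: list) -> str:
--     for field in FIELDS_SIMPLE:  # populate FIELDS_SIMPLE format blocks
--         in_block = False
--         ret = ''
--         while format:
--             ind = format.find('//')
--             if ind >= 0:
--                 block = format[:ind]
--                 if in_block:
--                     if 'FIELDS_SIMPLE' in block:
--                         ret += block.replace('FIELDS_SIMPLE', f'{field}')
--                     ret += f'//{block}//'
--                     in_block = False
--                 else: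
--                     ret += f'{block}'
--                     in_block = True
--                 format = format[ind + 2:]
--             else:
--                 ret += format
--                 break
--         format = ret
--
--     in_block = False
--     ret = ''  # remove FIELDS_SIMPLE format blocks
--     while format:
--         ind = format.find('//')
--         if ind >= 0:
--             block = format[:ind]
--             if in_block:
--                 if 'FIELDS_SIMPLE' not in block:
--                     ret += f'//{block}//'
--                 in_block = False
--             else:
--                 ret += f'{block}'
--                 in_block = True
--             format = format[ind + 2:]
--         else:
--             ret += format
--             break
--
--     return ret
-- ===== SOURCE B (Python) =====
-- def populate_simple(format: str, FIELDS_SIMPLE: list) -> str: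
--     # One parse into '//'-separated parts: even inner parts are plain text, odd
--     # inner parts are format blocks, the last part is the unterminated tail.
--     parts = format.split('//')
--     body, tail = parts[:-1], parts[-1]
--     out = []
--     inside = False
--     for p in body:
--         if not inside:
--             out.append(p)
--         elif 'FIELDS_SIMPLE' in p:
--             out.extend(p.replace('FIELDS_SIMPLE', f) for f in FIELDS_SIMPLE)
--         else:
--             out.append('//' + p + '//')
--         inside = not inside
--     out.append(tail)
--     return ''.join(out)
-- ===== Notes on version B (the rewrite author's own statement) =====
-- stated objective: faster
-- what changed: A re-scans the whole format string once per field and then a final removal scan (each scan re-parsing '//' blocks with find/slicing); B splits the format into '//'-parts once and renders the result in a single pass, emitting the join of all field substitutions per block.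
-- outside the precondition, e.g. on populate_simple('//FIELDS_SIMPLE//x', ['a//b']): A returns 'a//b//FIELDS_SIMPLEx', B returns 'a//bx'
import Mathlib
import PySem

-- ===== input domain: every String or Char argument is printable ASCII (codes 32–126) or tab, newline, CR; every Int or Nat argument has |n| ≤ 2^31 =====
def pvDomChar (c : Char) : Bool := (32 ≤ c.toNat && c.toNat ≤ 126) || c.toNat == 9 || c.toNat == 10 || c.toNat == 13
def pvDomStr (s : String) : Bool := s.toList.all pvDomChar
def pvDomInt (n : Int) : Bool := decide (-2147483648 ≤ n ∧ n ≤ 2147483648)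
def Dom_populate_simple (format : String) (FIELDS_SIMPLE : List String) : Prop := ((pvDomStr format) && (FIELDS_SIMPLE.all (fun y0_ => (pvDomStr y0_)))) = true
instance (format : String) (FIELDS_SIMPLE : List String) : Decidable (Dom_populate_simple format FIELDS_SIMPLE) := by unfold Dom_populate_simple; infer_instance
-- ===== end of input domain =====

-- B replaces A's per-field full-string re-scan (and final removal re-scan) by a single
-- parse into '//'-separated parts, emitting every field's substitution in one pass.

def pvSEP : List Char := ['/', '/']
def pvTOK : List Char := "FIELDS_SIMPLE".toList

-- ===== PORT A =====
-- one iteration of A's first while-loop (per field): scan for '//', toggle in_block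
def pvLoopField (field : List Char) (fmt : List Char) (in_block : Bool) (ret : List Char) : List Char :=
  if _h : fmt = [] then ret
  else
    let ind := PySem.Chars.find fmt pvSEP
    if _h2 : 0 ≤ ind then
      let block := PySem.List.slice fmt none (some ind)
      if in_block then
        pvLoopField field (PySem.List.slice fmt (some (ind + 2)) none) false
          ((if PySem.Chars.isIn pvTOK block then ret ++ PySem.Chars.replace block pvTOK field else ret)
            ++ pvSEP ++ block ++ pvSEP)
      else
        pvLoopField field (PySem.List.slice fmt (some (ind + 2)) none) true (ret ++ block)
    else ret ++ fmt
termination_by fmt.length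
decreasing_by
  all_goals
    rw [PySem.List.slice_from fmt (by have := PySem.Chars.neg_one_le_find fmt pvSEP; omega)]
    have h1 : 0 < fmt.length := List.length_pos_iff.mpr _h
    simp only [List.length_drop]
    omega

-- A's second while-loop: remove blocks still containing the token
def pvLoopRemove (fmt : List Char) (in_block : Bool) (ret : List Char) : List Char :=
  if _h : fmt = [] then ret
  else
    let ind := PySem.Chars.find fmt pvSEP
    if _h2 : 0 ≤ ind then
      let block := PySem.List.slice fmt none (some ind)
      if in_block then
        pvLoopRemove (PySem.List.slice fmt (some (ind + 2)) none) false
          (if PySem.Chars.isIn pvTOK block then ret else ret ++ pvSEP ++ block ++ pvSEP)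
      else
        pvLoopRemove (PySem.List.slice fmt (some (ind + 2)) none) true (ret ++ block)
    else ret ++ fmt
termination_by fmt.length
decreasing_by
  all_goals
    rw [PySem.List.slice_from fmt (by have := PySem.Chars.neg_one_le_find fmt pvSEP; omega)]
    have h1 : 0 < fmt.length := List.length_pos_iff.mpr _h
    simp only [List.length_drop]
    omega

def populate_simple (format : String) (FIELDS_SIMPLE : List String) : String :=
  String.ofList (pvLoopRemove
    (FIELDS_SIMPLE.foldl (fun fmt field => pvLoopField field.toList fmt false []) format.toList)
    false [])

-- ===== PORT B =====
def populate_simple_alt (format : String) (FIELDS_SIMPLE : List String) : String :=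
  let parts := PySem.Chars.splitOn format.toList pvSEP
  let body := PySem.List.slice parts none (some (-1))          -- parts[:-1]
  let tail := (PySem.List.pyGet? parts (-1)).getD []           -- parts[-1]; split never returns [], default dead
  let st := body.foldl (fun (st : Bool × List (List Char)) p =>
      (!st.1,
       if st.1 = false then st.2 ++ [p]
       else if PySem.Chars.isIn pvTOK p then
         st.2 ++ FIELDS_SIMPLE.map (fun f => PySem.Chars.replace p pvTOK f.toList)
       else st.2 ++ [pvSEP ++ p ++ pvSEP]))
    (false, [])
  String.ofList (PySem.Chars.join [] (st.2 ++ [tail]))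

-- ===== PRECONDITION & SPEC =====
-- the substituted text a field pass inserts for block q and field f ('' when the block has no token)
def pvReplC (q f : List Char) : List Char :=
  if PySem.Chars.isIn pvTOK q then PySem.Chars.replace q pvTOK f else []

-- over the '//'-parts of format: every inner block (odd position, not the trailing part) must,
-- for each field, yield inserted text that neither contains '//' nor ends in '/'
def pvPreB (F : List String) : List (List Char) → Bool
  | [] => true
  | [_] => true
  | [_, _] => true
  | _ :: q :: P'' => (F.all fun f => !PySem.Chars.isIn pvSEP (pvReplC q f.toList ++ ['/'])) && pvPreB F P''

-- Pre_ excludes inputs where substituting a field name into a block creates a new '//' delimiter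
-- (a field containing '//', or juxtaposition producing '//'), which A then re-parses as block
-- structure in later passes — an accident of A's iterated re-scanning of its own output.
def Pre_populate_simple (format : String) (FIELDS_SIMPLE : List String) : Prop :=
  pvPreB FIELDS_SIMPLE (PySem.Chars.splitOn format.toList pvSEP) = true

instance (format : String) (FIELDS_SIMPLE : List String) : Decidable (Pre_populate_simple format FIELDS_SIMPLE) := by
  unfold Pre_populate_simple; infer_instance

def pvWitness_populate_simple : String × List String := ("a//FIELDS_SIMPLE//b", ["x", "y"])

def Spec_populate_simple (format : String) (FIELDS_SIMPLE : List String) (out : String) : Prop := out = populate_simple_alt format FIELDS_SIMPLE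
instance (format : String) (FIELDS_SIMPLE : List String) (out : String) : Decidable (Spec_populate_simple format FIELDS_SIMPLE out) := by unfold Spec_populate_simple; infer_instance

-- ===== CLAIM (what is proved, stated in full; the proofs are below) =====
def Claim_equal_populate_simple : Prop := ∀ (format : String) (FIELDS_SIMPLE : List String), Dom_populate_simple format FIELDS_SIMPLE → Pre_populate_simple format FIELDS_SIMPLE → Spec_populate_simple format FIELDS_SIMPLE (populate_simple format FIELDS_SIMPLE)

-- ===== LEMMAS AND PROOFS =====

-- no '//' inside x
def pvNoSep (x : List Char) : Prop := PySem.Chars.isIn pvSEP x = false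
-- no '//' inside x, and x does not end in '/'
def pvC (x : List Char) : Prop := pvNoSep (x ++ ['/'])

lemma pvPrefix_sep_iff (l : List Char) : pvSEP <+: l ↔ (l[0]? = some '/' ∧ l[1]? = some '/') := by
  match l with
  | [] => simp [pvSEP]
  | [c] => simp [pvSEP, List.cons_prefix_cons]
  | c :: d :: t => simp [pvSEP, List.cons_prefix_cons, eq_comm]

lemma pvNoSep_iff (x : List Char) : pvNoSep x ↔ ∀ i : Nat, ¬(x[i]? = some '/' ∧ x[i+1]? = some '/') := by
  unfold pvNoSep
  rw [← Bool.not_eq_true, ← PySem.Chars.exists_prefix_drop_iff_isIn]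
  constructor
  · intro h i hi
    exact h ⟨i, (pvPrefix_sep_iff _).mpr ⟨by rw [List.getElem?_drop]; simpa using hi.1, by rw [List.getElem?_drop]; exact hi.2⟩⟩
  · rintro h ⟨j, hj⟩
    rcases (pvPrefix_sep_iff _).mp hj with ⟨h1, h2⟩
    rw [List.getElem?_drop] at h1 h2; simp only [Nat.add_zero] at h1
    exact h j ⟨h1, h2⟩

lemma pvNoSep_append {x y : List Char} (hx : pvC x) (hy : pvNoSep y) : pvNoSep (x ++ y) := by
  unfold pvC at hx
  rw [pvNoSep_iff] at *
  intro i hi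
  rcases hi with ⟨h1, h2⟩
  by_cases c2 : i + 1 < x.length
  · have c1 : i < x.length := by omega
    rw [List.getElem?_append_left c1] at h1
    rw [List.getElem?_append_left c2] at h2
    exact hx i ⟨by rw [List.getElem?_append_left c1]; exact h1,
                by rw [List.getElem?_append_left c2]; exact h2⟩
  · by_cases c1 : i < x.length
    · have he : i + 1 = x.length := by omega
      rw [List.getElem?_append_left c1] at h1
      exact hx i ⟨by rw [List.getElem?_append_left c1]; exact h1,
        by rw [List.getElem?_append_right (by omega)]; simp [he]⟩
    · have hc1 : x.length ≤ i := by omega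
      rw [List.getElem?_append_right hc1] at h1
      rw [List.getElem?_append_right (by omega)] at h2
      refine hy (i - x.length) ⟨h1, ?_⟩
      have : i + 1 - x.length = i - x.length + 1 := by omega
      rwa [this] at h2

lemma pvC_append {x y : List Char} (hx : pvC x) (hy : pvC y) : pvC (x ++ y) := by
  unfold pvC at *
  rw [List.append_assoc]
  exact pvNoSep_append hx hy

lemma pvC_cons {c : Char} {x : List Char} (h : pvC (c :: x)) : pvC x := by
  unfold pvC at *
  rw [pvNoSep_iff] at *
  intro i hi
  exact h (i + 1) (by simpa using hi)

lemma pvNoSep_of_C {x : List Char} (h : pvC x) : pvNoSep x := by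
  unfold pvC at h
  rw [pvNoSep_iff] at *
  intro i hi
  rcases hi with ⟨h1, h2⟩
  have hl1 : i < x.length := (List.getElem?_eq_some_iff.mp h1).1
  have hl2 : i + 1 < x.length := (List.getElem?_eq_some_iff.mp h2).1
  exact h i ⟨by rw [List.getElem?_append_left hl1]; exact h1,
             by rw [List.getElem?_append_left hl2]; exact h2⟩

-- the canonical '//'-splitting of a string, leftmost match, as a recursion on characters
def pvParts : List Char → List (List Char)
  | [] => [[]]
  | c :: rest =>
    if pvSEP.isPrefixOf (c :: rest) then [] :: pvParts (rest.drop 1)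
    else
      match pvParts rest with
      | [] => [[c]]
      | p :: ps => (c :: p) :: ps
termination_by l => l.length
decreasing_by all_goals (simp only [List.length_drop, List.length_cons]; omega)

lemma pvNoSep_cons {c : Char} {x : List Char} (h : pvNoSep (c :: x)) : pvNoSep x := by
  rw [pvNoSep_iff] at *
  intro i hi
  exact h (i + 1) (by simpa using hi)

lemma pvParts_ne_nil (l : List Char) : pvParts l ≠ [] := by
  fun_induction pvParts l with
  | case1 => simp
  | case2 c rest hpre ih => simp
  | case3 c rest hpre hm ih => simp
  | case4 c rest hpre p ps hm ih => simp

lemma pvParts_no_sep {l : List Char} (h : pvNoSep l) : pvParts l = [l] := by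
  fun_induction pvParts l with
  | case1 => rfl
  | case2 c rest hpre ih =>
    exfalso
    have := (pvPrefix_sep_iff _).mp (List.isPrefixOf_iff_prefix.mp hpre)
    exact (pvNoSep_iff _).mp h 0 (by simpa using this)
  | case3 c rest hpre hm ih =>
    exact absurd (ih (pvNoSep_cons h)) (by simp [hm])
  | case4 c rest hpre p ps hm ih =>
    have hthis := ih (pvNoSep_cons h)
    rw [hm] at hthis
    injection hthis with e1 e2
    subst e1; subst e2
    rfl

lemma pvParts_append_sep {x : List Char} (rest : List Char) (hx : pvC x) :
    pvParts (x ++ pvSEP ++ rest) = x :: pvParts rest := by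
  induction x with
  | nil =>
    show pvParts ('/' :: '/' :: rest) = _
    rw [pvParts]
    simp [pvSEP, List.isPrefixOf]
  | cons c x' ih =>
    have hnp : ¬ pvSEP.isPrefixOf (c :: (x' ++ pvSEP ++ rest)) = true := by
      intro hp
      rcases (pvPrefix_sep_iff _).mp (List.isPrefixOf_iff_prefix.mp hp) with ⟨h0, h1⟩
      simp only [List.getElem?_cons_zero, Option.some.injEq] at h0
      match x', h1 with
      | [], h1 =>
        have : pvC ['/'] := h0 ▸ hx
        exact absurd this (by unfold pvC pvNoSep; decide)
      | d :: t, h1 =>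
        simp only [List.cons_append, List.getElem?_cons_succ, List.getElem?_cons_zero,
          Option.some.injEq] at h1
        exact (pvNoSep_iff _).mp (pvNoSep_of_C hx) 0 (by simp [h0, h1])
    have hstep : pvParts (c :: (x' ++ pvSEP ++ rest)) =
        match pvParts (x' ++ pvSEP ++ rest) with
        | [] => [[c]]
        | p :: ps => (c :: p) :: ps := by
      rw [pvParts, if_neg hnp]
    rw [show ((c :: x') ++ pvSEP ++ rest) = c :: (x' ++ pvSEP ++ rest) by simp, hstep,
      ih (pvC_cons hx)]

lemma pvFind_neg {s : List Char} (h : PySem.Chars.find s pvSEP = -1) : pvNoSep s := by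
  unfold pvNoSep
  rw [PySem.Chars.isIn_eq_false_iff]
  exact (PySem.Chars.find_eq_neg_one_iff s pvSEP).mp h

lemma pvFind_decomp {s : List Char} (h : 0 ≤ PySem.Chars.find s pvSEP) :
    pvC (s.take (PySem.Chars.find s pvSEP).toNat) ∧
    s = s.take (PySem.Chars.find s pvSEP).toNat ++ pvSEP ++ s.drop ((PySem.Chars.find s pvSEP).toNat + 2) ∧
    (PySem.Chars.find s pvSEP).toNat + 2 ≤ s.length := by
  obtain ⟨hpre, hmin⟩ := PySem.Chars.find_spec h
  set n := (PySem.Chars.find s pvSEP).toNat with hn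
  obtain ⟨t, ht⟩ := hpre
  have hlen : n + 2 ≤ s.length := by
    have := congrArg List.length ht
    simp [pvSEP] at this
    have hfle := PySem.Chars.find_le_length s pvSEP
    omega
  have hsep : ∀ j, n ≤ j → j < n + 2 → s[j]? = some '/' := by
    intro j hj1 hj2
    have : s[j]? = (List.drop n s)[j - n]? := by rw [List.getElem?_drop]; congr 1; omega
    rw [this, ← ht]
    have hj : j - n = 0 ∨ j - n = 1 := by omega
    rcases hj with hj | hj <;> rw [hj] <;> simp [pvSEP]
  constructor
  · unfold pvC
    rw [pvNoSep_iff]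
    intro i hi
    rcases hi with ⟨h1, h2⟩
    have hilen : (s.take n).length = min n s.length := by simp
    have hnlen : (s.take n).length = n := by simp; omega
    -- h1/h2 are about (take n s ++ ['/'])
    by_cases c2 : i + 1 < n
    · rw [List.getElem?_append_left (by omega), List.getElem?_take_of_lt (by omega)] at h1
      rw [List.getElem?_append_left (by omega), List.getElem?_take_of_lt (by omega)] at h2
      exact hmin i (by omega) ((pvPrefix_sep_iff _).mpr
        ⟨by rw [List.getElem?_drop]; simpa using h1, by rw [List.getElem?_drop]; exact h2⟩)
    · by_cases c1 : i < n
      · have he : i + 1 = n := by omega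
        rw [List.getElem?_append_left (by omega), List.getElem?_take_of_lt (by omega)] at h1
        have hs2 : s[i+1]? = some '/' := by rw [he]; exact hsep n (by omega) (by omega)
        exact hmin i (by omega) ((pvPrefix_sep_iff _).mpr
          ⟨by rw [List.getElem?_drop]; simpa using h1, by rw [List.getElem?_drop]; exact hs2⟩)
      · -- i ≥ n: (take n s ++ ['/'])[i]? : i = n gives '/', i+1 = n+1 out of range → h2 none
        have : (s.take n ++ ['/'])[i+1]? = none := by
          rw [List.getElem?_eq_none_iff]
          simp
          omega
        rw [this] at h2
        exact absurd h2 (by simp)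
  · constructor
    · have : s = s.take n ++ s.drop n := by simp
      nth_rewrite 1 [this]
      rw [← ht]
      have h2 : t = s.drop (n + 2) := by
        have := congrArg (List.drop 2) ht
        simp [pvSEP] at this
        exact this
      rw [h2]
      simp [pvSEP]
    · exact hlen

lemma pvParts_decomp {s : List Char} (h : 0 ≤ PySem.Chars.find s pvSEP) :
    pvParts s = s.take (PySem.Chars.find s pvSEP).toNat ::
      pvParts (s.drop ((PySem.Chars.find s pvSEP).toNat + 2)) := by
  obtain ⟨hC, hdec, _⟩ := pvFind_decomp h
  nth_rewrite 1 [hdec]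
  exact pvParts_append_sep _ hC

-- canonicity of a parts list: all non-last parts satisfy pvC, the last has no '//'
def pvCanon : List (List Char) → Prop
  | [] => True
  | [p] => pvNoSep p
  | p :: ps => pvC p ∧ pvCanon ps

lemma pvCanon_parts (s : List Char) : pvCanon (pvParts s) := by
  generalize hN : s.length = N
  induction N using Nat.strong_induction_on generalizing s with
  | _ N ih =>
    by_cases h : 0 ≤ PySem.Chars.find s pvSEP
    · obtain ⟨hC, _, hle⟩ := pvFind_decomp h
      rw [pvParts_decomp h]
      have hrec := ih (s.drop ((PySem.Chars.find s pvSEP).toNat + 2)).length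
        (by simp [List.length_drop]; omega) _ rfl
      rcases hq : pvParts (s.drop ((PySem.Chars.find s pvSEP).toNat + 2)) with _ | ⟨q, qs⟩
      · exact absurd hq (pvParts_ne_nil _)
      · rw [hq] at hrec
        exact ⟨hC, hrec⟩
    · have hm : PySem.Chars.find s pvSEP = -1 := by
        have := PySem.Chars.neg_one_le_find s pvSEP; omega
      rw [pvParts_no_sep (pvFind_neg hm)]
      exact pvFind_neg hm

-- generic one-scan render over a parts list with a toggling in_block flag
def pvPass (emit : Bool → List Char → List Char) : Bool → List (List Char) → List Char
  | _, [] => []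
  | _, [p] => p
  | b, p :: ps => emit b p ++ pvPass emit (!b) ps

def pvEmitF (f : List Char) (b : Bool) (p : List Char) : List Char :=
  if b then pvReplC p f ++ pvSEP ++ p ++ pvSEP else p

def pvEmitR (b : Bool) (p : List Char) : List Char :=
  if b then (if PySem.Chars.isIn pvTOK p then [] else pvSEP ++ p ++ pvSEP) else p

def pvEmitB (F : List String) (b : Bool) (p : List Char) : List Char :=
  if b then (if PySem.Chars.isIn pvTOK p then F.flatMap (fun f => PySem.Chars.replace p pvTOK f.toList)
             else pvSEP ++ p ++ pvSEP)
  else p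

lemma pvPass_single (E : Bool → List Char → List Char) (b : Bool) (p : List Char) :
    pvPass E b [p] = p := rfl

lemma pvPass_cons (E : Bool → List Char → List Char) (b : Bool) (p q : List Char)
    (ps : List (List Char)) :
    pvPass E b (p :: q :: ps) = E b p ++ pvPass E (!b) (q :: ps) := rfl

lemma pvLoopField_eq (f : List Char) (s : List Char) (b : Bool) (ret : List Char) :
    pvLoopField f s b ret = ret ++ pvPass (pvEmitF f) b (pvParts s) := by
  fun_induction pvLoopField f s b ret with
  | case1 in_block ret =>
    rw [show pvParts [] = [[]] from by rw [pvParts], pvPass_single, List.append_nil]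
  | case2 fmt ret h ind h2 block ih =>
    simp only [dite_eq_ite] at ih
    rw [ih]
    have hto : (ind + 2).toNat = ind.toNat + 2 := by omega
    have hblock : block = fmt.take ind.toNat := PySem.List.slice_to fmt h2
    have hnext : PySem.List.slice fmt (some (ind + 2)) none = fmt.drop (ind.toNat + 2) := by
      rw [PySem.List.slice_from fmt (by omega), hto]
    have hdec : pvParts fmt = fmt.take ind.toNat :: pvParts (fmt.drop (ind.toNat + 2)) :=
      pvParts_decomp h2
    rw [hnext, hdec]
    rcases hq : pvParts (fmt.drop (ind.toNat + 2)) with _ | ⟨q, qs⟩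
    · exact absurd hq (pvParts_ne_nil _)
    · rw [pvPass_cons]
      show _ ++ pvPass (pvEmitF f) false (q :: qs) = ret ++ (pvEmitF f true (fmt.take ind.toNat) ++ pvPass (pvEmitF f) false (q :: qs))
      simp only [pvEmitF, pvReplC, if_pos, ← hblock]
      by_cases ht : PySem.Chars.isIn pvTOK block = true <;> simp [ht, List.append_assoc]
  | case3 fmt in_block ret h ind h2 block hnb ih =>
    simp only [Bool.not_eq_true] at hnb
    subst hnb
    rw [ih]
    have hto : (ind + 2).toNat = ind.toNat + 2 := by omega
    have hblock : block = fmt.take ind.toNat := PySem.List.slice_to fmt h2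
    have hnext : PySem.List.slice fmt (some (ind + 2)) none = fmt.drop (ind.toNat + 2) := by
      rw [PySem.List.slice_from fmt (by omega), hto]
    have hdec : pvParts fmt = fmt.take ind.toNat :: pvParts (fmt.drop (ind.toNat + 2)) :=
      pvParts_decomp h2
    rw [hnext, hdec]
    rcases hq : pvParts (fmt.drop (ind.toNat + 2)) with _ | ⟨q, qs⟩
    · exact absurd hq (pvParts_ne_nil _)
    · rw [pvPass_cons]
      rw [hblock]
      rw [List.append_assoc]
      simp only [Bool.not_false]
      rfl
  | case4 fmt in_block ret h ind h2 =>
    have hm : PySem.Chars.find fmt pvSEP = -1 := by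
      have := PySem.Chars.neg_one_le_find fmt pvSEP; omega
    rw [pvParts_no_sep (pvFind_neg hm), pvPass_single]

lemma pvLoopRemove_eq (s : List Char) (b : Bool) (ret : List Char) :
    pvLoopRemove s b ret = ret ++ pvPass pvEmitR b (pvParts s) := by
  fun_induction pvLoopRemove s b ret with
  | case1 in_block ret =>
    rw [show pvParts [] = [[]] from by rw [pvParts], pvPass_single, List.append_nil]
  | case2 fmt ret h ind h2 block ih =>
    simp only [dite_eq_ite] at ih
    rw [ih]
    have hto : (ind + 2).toNat = ind.toNat + 2 := by omega
    have hblock : block = fmt.take ind.toNat := PySem.List.slice_to fmt h2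
    have hnext : PySem.List.slice fmt (some (ind + 2)) none = fmt.drop (ind.toNat + 2) := by
      rw [PySem.List.slice_from fmt (by omega), hto]
    have hdec : pvParts fmt = fmt.take ind.toNat :: pvParts (fmt.drop (ind.toNat + 2)) :=
      pvParts_decomp h2
    rw [hnext, hdec]
    rcases hq : pvParts (fmt.drop (ind.toNat + 2)) with _ | ⟨q, qs⟩
    · exact absurd hq (pvParts_ne_nil _)
    · rw [pvPass_cons]
      show _ ++ pvPass pvEmitR false (q :: qs) = ret ++ (pvEmitR true (fmt.take ind.toNat) ++ pvPass pvEmitR false (q :: qs))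
      simp only [pvEmitR, if_pos, ← hblock]
      by_cases ht : PySem.Chars.isIn pvTOK block = true <;> simp [ht, List.append_assoc]
  | case3 fmt in_block ret h ind h2 block hnb ih =>
    simp only [Bool.not_eq_true] at hnb
    subst hnb
    rw [ih]
    have hto : (ind + 2).toNat = ind.toNat + 2 := by omega
    have hblock : block = fmt.take ind.toNat := PySem.List.slice_to fmt h2
    have hnext : PySem.List.slice fmt (some (ind + 2)) none = fmt.drop (ind.toNat + 2) := by
      rw [PySem.List.slice_from fmt (by omega), hto]
    have hdec : pvParts fmt = fmt.take ind.toNat :: pvParts (fmt.drop (ind.toNat + 2)) :=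
      pvParts_decomp h2
    rw [hnext, hdec]
    rcases hq : pvParts (fmt.drop (ind.toNat + 2)) with _ | ⟨q, qs⟩
    · exact absurd hq (pvParts_ne_nil _)
    · rw [pvPass_cons]
      rw [hblock]
      rw [List.append_assoc]
      simp only [Bool.not_false]
      rfl
  | case4 fmt in_block ret h ind h2 =>
    have hm : PySem.Chars.find fmt pvSEP = -1 := by
      have := PySem.Chars.neg_one_le_find fmt pvSEP; omega
    rw [pvParts_no_sep (pvFind_neg hm), pvPass_single]

-- the effect of one field pass at the parts level
def pvStep (f : List Char) : List (List Char) → List (List Char)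
  | [] => []
  | [p] => [p]
  | [p, q] => [p ++ q]
  | p :: q :: P'' => (p ++ pvReplC q f) :: q :: pvStep f P''

lemma pvCanon_cons_iff {p : List Char} {ps : List (List Char)} (h : ps ≠ []) :
    pvCanon (p :: ps) ↔ pvC p ∧ pvCanon ps := by
  match ps, h with
  | q :: t, _ => rfl

lemma pvC_of_pre {F : List String} {f : String} (hf : f ∈ F)
    (h : (F.all fun f => !PySem.Chars.isIn pvSEP (pvReplC q f.toList ++ ['/'])) = true) :
    pvC (pvReplC q f.toList) := by
  rw [List.all_eq_true] at h
  have := h f hf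
  simp only [Bool.not_eq_true'] at this
  exact this

lemma pvStep_ne_nil (f : List Char) {P : List (List Char)} (h : P ≠ []) : pvStep f P ≠ [] := by
  match P, h with
  | [p], _ => simp [pvStep]
  | [p, q], _ => simp [pvStep]
  | p :: q :: r :: t, _ => simp [pvStep]

lemma pvCanon_step {F : List String} {f : String} (hf : f ∈ F) : ∀ {P : List (List Char)},
    pvCanon P → pvPreB F P = true → pvCanon (pvStep f.toList P)
  | [], _, _ => trivial
  | [p], hP, _ => hP
  | [p, q], hP, _ => by
    show pvNoSep (p ++ q)
    exact pvNoSep_append hP.1 hP.2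
  | p :: q :: r :: t, hP, hpre => by
    have hpre' : ((F.all fun f => !PySem.Chars.isIn pvSEP (pvReplC q f.toList ++ ['/'])) = true)
        ∧ pvPreB F (r :: t) = true := by
      simpa [pvPreB, Bool.and_eq_true] using hpre
    show pvCanon ((p ++ pvReplC q f.toList) :: q :: pvStep f.toList (r :: t))
    rw [pvCanon_cons_iff (by simp), pvCanon_cons_iff (pvStep_ne_nil _ (by simp))]
    exact ⟨pvC_append hP.1 (pvC_of_pre hf hpre'.1), hP.2.1,
      pvCanon_step hf hP.2.2 hpre'.2⟩

lemma pvPreB_step {F : List String} (g : List Char) : ∀ {P : List (List Char)},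
    pvPreB F P = true → pvPreB F (pvStep g P) = true
  | [], _ => rfl
  | [p], _ => rfl
  | [p, q], _ => rfl
  | p :: q :: r :: t, hpre => by
    have hpre' : ((F.all fun f => !PySem.Chars.isIn pvSEP (pvReplC q f.toList ++ ['/'])) = true)
        ∧ pvPreB F (r :: t) = true := by
      simpa [pvPreB, Bool.and_eq_true] using hpre
    show pvPreB F ((p ++ pvReplC q g) :: q :: pvStep g (r :: t)) = true
    have hrec := pvPreB_step g hpre'.2
    rcases hs : pvStep g (r :: t) with _ | ⟨u, us⟩
    · exact absurd hs (pvStep_ne_nil _ (by simp))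
    · rw [hs] at hrec
      simp [pvPreB, hpre'.1, hrec]

-- KEY: re-parsing the output of one field pass gives exactly the parts-level step
lemma pvParts_pass {F : List String} {f : String} (hf : f ∈ F) : ∀ {P : List (List Char)},
    P ≠ [] → pvCanon P → pvPreB F P = true →
    pvParts (pvPass (pvEmitF f.toList) false P) = pvStep f.toList P
  | [], hne, _, _ => absurd rfl hne
  | [p], _, hP, _ => by
    show pvParts p = [p]
    exact pvParts_no_sep hP
  | [p, q], _, hP, _ => by
    show pvParts (pvEmitF f.toList false p ++ pvPass (pvEmitF f.toList) true [q]) = [p ++ q]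
    rw [pvPass_single]
    show pvParts (p ++ q) = [p ++ q]
    exact pvParts_no_sep (pvNoSep_append hP.1 hP.2)
  | p :: q :: r :: t, _, hP, hpre => by
    have hpre' : ((F.all fun f => !PySem.Chars.isIn pvSEP (pvReplC q f.toList ++ ['/'])) = true)
        ∧ pvPreB F (r :: t) = true := by
      simpa [pvPreB, Bool.and_eq_true] using hpre
    have hCq : pvC q := hP.2.1
    have hCpr : pvC (p ++ pvReplC q f.toList) := pvC_append hP.1 (pvC_of_pre hf hpre'.1)
    have ih := pvParts_pass hf (P := r :: t) (by simp) hP.2.2 hpre'.2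
    show pvParts (pvEmitF f.toList false p ++ (pvEmitF f.toList true q ++
      pvPass (pvEmitF f.toList) (!true) (r :: t))) = _
    simp only [pvEmitF, Bool.not_true, Bool.false_eq_true, if_true, if_false]
    have hassoc : p ++ ((pvReplC q f.toList ++ pvSEP ++ q ++ pvSEP) ++
        pvPass (pvEmitF f.toList) false (r :: t)) =
        (p ++ pvReplC q f.toList) ++ pvSEP ++ (q ++ pvSEP ++ pvPass (pvEmitF f.toList) false (r :: t)) := by
      simp [List.append_assoc]
    rw [hassoc, pvParts_append_sep _ hCpr]
    rw [pvParts_append_sep _ hCq, ih]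
    rfl

lemma pvPass_step (L : List String) (f : String) : ∀ (P : List (List Char)),
    pvPass (pvEmitB L) false (pvStep f.toList P) = pvPass (pvEmitB (f :: L)) false P
  | [] => rfl
  | [p] => rfl
  | [p, q] => by
    show pvPass (pvEmitB L) false [p ++ q] = pvPass (pvEmitB (f :: L)) false [p, q]
    rw [pvPass_single]
    show p ++ q = pvEmitB (f :: L) false p ++ pvPass (pvEmitB (f :: L)) true [q]
    rw [pvPass_single]
    rfl
  | p :: q :: r :: t => by
    show pvPass (pvEmitB L) false ((p ++ pvReplC q f.toList) :: q :: pvStep f.toList (r :: t)) = _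
    rcases hs : pvStep f.toList (r :: t) with _ | ⟨u, us⟩
    · exact absurd hs (pvStep_ne_nil _ (by simp))
    · rw [pvPass_cons, pvPass_cons (ps := us)]
      have ih := pvPass_step L f (r :: t)
      rw [hs] at ih
      show (p ++ pvReplC q f.toList) ++ (pvEmitB L true q ++ pvPass (pvEmitB L) (!true) (u :: us)) = _
      rw [show pvPass (pvEmitB L) (!true) (u :: us) = pvPass (pvEmitB L) false (u :: us) from rfl, ih]
      show _ = pvEmitB (f :: L) false p ++ (pvEmitB (f :: L) true q ++ pvPass (pvEmitB (f :: L)) (!true) (r :: t))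
      have hemit : pvReplC q f.toList ++ pvEmitB L true q = pvEmitB (f :: L) true q := by
        unfold pvReplC pvEmitB
        by_cases ht : PySem.Chars.isIn pvTOK q = true <;> simp [ht]
      rw [← hemit]
      simp [pvEmitB, List.append_assoc]

lemma pvEmitR_eq : pvEmitR = pvEmitB [] := by
  funext b p
  unfold pvEmitR pvEmitB
  by_cases hb : b <;> by_cases ht : PySem.Chars.isIn pvTOK p = true <;> simp [hb, ht]

lemma pvFold {F : List String} : ∀ (L : List String) (s : List Char), (∀ f ∈ L, f ∈ F) →
    pvPreB F (pvParts s) = true →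
    pvLoopRemove (L.foldl (fun fmt f => pvLoopField f.toList fmt false []) s) false [] =
      pvPass (pvEmitB L) false (pvParts s)
  | [], s, _, _ => by
    rw [List.foldl_nil, pvLoopRemove_eq, List.nil_append, pvEmitR_eq]
  | f :: L, s, hmem, hpre => by
    rw [List.foldl_cons]
    have h1 : pvLoopField f.toList s false [] = pvPass (pvEmitF f.toList) false (pvParts s) := by
      rw [pvLoopField_eq, List.nil_append]
    have h2 : pvParts (pvLoopField f.toList s false []) = pvStep f.toList (pvParts s) := by
      rw [h1]
      exact pvParts_pass (hmem f (by simp)) (pvParts_ne_nil s) (pvCanon_parts s) hpre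
    have ih := pvFold L (pvLoopField f.toList s false [])
      (fun g hg => hmem g (by simp [hg]))
      (by rw [h2]; exact pvPreB_step _ hpre)
    rw [ih, h2, pvPass_step]

-- splitOn agrees with pvParts
def pvHeadCons (x : List Char) : List (List Char) → List (List Char)
  | [] => [x]
  | p :: ps => (x ++ p) :: ps

lemma pvSplitOn_go (fuel : Nat) : ∀ (l cur : List Char) (acc : List (List Char)),
    l.length < fuel →
    PySem.Chars.splitOn.go pvSEP fuel l cur acc =
      acc.reverse ++ pvHeadCons cur.reverse (pvParts l) := by
  induction fuel with
  | zero => intro l cur acc h; omega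
  | succ n ih =>
    intro l cur acc h
    match l with
    | [] =>
      rw [PySem.Chars.splitOn.go]
      rw [show pvParts [] = [[]] from by rw [pvParts]]
      simp [pvHeadCons]
      omega
    | c :: rest =>
      rw [PySem.Chars.splitOn.go]
      by_cases hp : pvSEP.isPrefixOf (c :: rest) = true
      · rw [if_pos hp]
        have hlen : (List.drop pvSEP.length (c :: rest)).length < n := by
          simp only [List.length_cons] at h
          simp only [pvSEP, List.length_drop, List.length_cons]
          omega
        rw [ih _ _ _ hlen]
        have : pvParts (c :: rest) = [] :: pvParts (rest.drop 1) := by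
          rw [pvParts, if_pos hp]
        rw [this]
        have hdrop : List.drop pvSEP.length (c :: rest) = rest.drop 1 := by
          simp [pvSEP]
        rw [hdrop]
        rcases hq : pvParts (rest.drop 1) with _ | ⟨p, ps⟩
        · exact absurd hq (pvParts_ne_nil _)
        · simp [pvHeadCons]
      · rw [if_neg hp]
        have hlen : rest.length < n := by simp at h; omega
        rw [ih _ _ _ hlen]
        have : pvParts (c :: rest) = match pvParts rest with
          | [] => [[c]]
          | p :: ps => (c :: p) :: ps := by
          rw [pvParts, if_neg hp]
        rw [this]
        rcases hq : pvParts rest with _ | ⟨p, ps⟩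
        · exact absurd hq (pvParts_ne_nil _)
        · simp [pvHeadCons]

lemma pvSplitOn_eq (s : List Char) : PySem.Chars.splitOn s pvSEP = pvParts s := by
  show PySem.Chars.splitOn.go pvSEP (s.length + 1) s [] [] = pvParts s
  rw [pvSplitOn_go (s.length + 1) s [] [] (by omega)]
  rcases hq : pvParts s with _ | ⟨p, ps⟩
  · exact absurd hq (pvParts_ne_nil _)
  · simp [pvHeadCons]

lemma pvJoin_nil_eq_flatten : ∀ (xs : List (List Char)), PySem.Chars.join [] xs = xs.flatten
  | [] => PySem.Chars.join_nil []
  | [p] => by rw [PySem.Chars.join_singleton]; simp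
  | p :: q :: rest => by
    rw [PySem.Chars.join_cons_cons, pvJoin_nil_eq_flatten (q :: rest)]
    simp

-- B's foldl render equals the generic pass
lemma pvB_render (F : List String) : ∀ (P : List (List Char)) (hne : P ≠ []) (b : Bool) (acc : List (List Char)),
    PySem.Chars.join [] ((P.dropLast.foldl (fun (st : Bool × List (List Char)) p =>
      (!st.1,
       if st.1 = false then st.2 ++ [p]
       else if PySem.Chars.isIn pvTOK p then
         st.2 ++ F.map (fun f => PySem.Chars.replace p pvTOK f.toList)
       else st.2 ++ [pvSEP ++ p ++ pvSEP])) (b, acc)).2 ++ [P.getLast hne]) =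
    PySem.Chars.join [] acc ++ pvPass (pvEmitB F) b P
  | [], hne, _, _ => absurd rfl hne
  | [p], _, b, acc => by
    simp only [List.dropLast_singleton, List.foldl_nil, List.getLast_singleton, pvPass_single,
      pvJoin_nil_eq_flatten]
    simp
  | p :: q :: t, _, b, acc => by
    rw [List.dropLast_cons₂, List.foldl_cons, List.getLast_cons (by simp)]
    rw [pvB_render F (q :: t) (by simp) (!b) _]
    rw [pvPass_cons]
    simp only [pvJoin_nil_eq_flatten]
    suffices h : (if b = false then acc ++ [p]
       else if PySem.Chars.isIn pvTOK p then
         acc ++ F.map (fun f => PySem.Chars.replace p pvTOK f.toList)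
       else acc ++ [pvSEP ++ p ++ pvSEP]).flatten = acc.flatten ++ pvEmitB F b p by
      rw [h, List.append_assoc]
    cases b with
    | false => simp [pvEmitB]
    | true =>
      by_cases ht : PySem.Chars.isIn pvTOK p = true <;>
        simp [pvEmitB, ht, List.flatMap_def]

lemma pvGetNeg1 {α : Type} (P : List α) (hne : P ≠ []) (d : α) :
    (PySem.List.pyGet? P (-1)).getD d = P.getLast hne := by
  have hl : 0 < P.length := List.length_pos_iff.mpr hne
  simp only [PySem.List.pyGet?, PySem.List.pyIdx?]
  rw [if_neg (by omega), if_pos (by omega)]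
  simp only [Option.bind_some]
  rw [List.getElem?_eq_getElem (by omega)]
  simp only [Option.getD_some]
  rw [List.getLast_eq_getElem]
  congr 1

-- ===== VERDICT (by name: the statement is the Claim_ definition above) =====
theorem populate_simple_spec : Claim_equal_populate_simple := by
  intro format FIELDS_SIMPLE _hdom hpre
  unfold Pre_populate_simple at hpre
  rw [pvSplitOn_eq] at hpre
  show populate_simple format FIELDS_SIMPLE = populate_simple_alt format FIELDS_SIMPLE
  unfold populate_simple populate_simple_alt
  simp only []
  congr 1
  rw [pvFold FIELDS_SIMPLE format.toList (fun _ h => h) hpre]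
  rw [pvSplitOn_eq, PySem.List.slice_to_neg_one,
    pvGetNeg1 (pvParts format.toList) (pvParts_ne_nil _) []]
  rw [pvB_render FIELDS_SIMPLE (pvParts format.toList) (pvParts_ne_nil _) false []]
  rw [PySem.Chars.join_nil, List.nil_append]
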